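-- pv_equiv track=rewrite | github.com/nsilveri/WindAnalizer | lib/get_ntp_time.py | _eu_dst_active_utc
-- ===== SOURCE A (Python) =====
-- def _is_leap_year(year: int) -> bool:
--     return (year % 4 == 0 and year % 100 != 0) or (year % 400 == 0)
--
-- def _days_in_month(year: int, month: int) -> int:
--     if month in (1, 3, 5, 7, 8, 10, 12):
--         return 31
--     if month in (4, 6, 9, 11):
--         return 30
--     return 29 if _is_leap_year(year) else 28
--
-- def _weekday_mon0(year: int, month: int, day: int) -> int:
--     """Weekday with Monday=0..Sunday=6 (Sakamoto)."""
--     t = [0, 3, 2, 5, 0, 3, 5, 1, 4, 6, 2, 4]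
--     y = year
--     if month < 3:
--         y -= 1
--     # Sakamoto returns Sunday=0..Saturday=6
--     w_sun0 = (y + y // 4 - y // 100 + y // 400 + t[month - 1] + day) % 7
--     # Convert to Monday=0..Sunday=6
--     return (w_sun0 - 1) % 7
--
-- def _eu_dst_active_utc(y: int, mo: int, d: int, hh: int, mm: int, ss: int) -> bool:
--     """EU DST rule in UTC: active from last Sunday of March 01:00 UTC to last Sunday of October 01:00 UTC."""
--     # last Sunday of March
--     mar_last = _days_in_month(y, 3)
--     while _weekday_mon0(y, 3, mar_last) != 6:
--         mar_last -= 1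
--     # last Sunday of October
--     oct_last = _days_in_month(y, 10)
--     while _weekday_mon0(y, 10, oct_last) != 6:
--         oct_last -= 1
--
--     cur = (y, mo, d, hh, mm, ss)
--     start = (y, 3, mar_last, 1, 0, 0)
--     end = (y, 10, oct_last, 1, 0, 0)
--     return cur >= start and cur < end
-- ===== SOURCE B (Python) =====
-- _B = 1 << 33  # packing base, larger than twice the 2**31 field bound
--
-- def _key(mo: int, d: int, hh: int, mm: int, ss: int) -> int:
--     """Pack (mo,d,hh,mm,ss) into one int; order = lexicographic order for |field| <= 2**31."""
--     return (((mo * _B + d) * _B + hh) * _B + mm) * _B + ss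
--
-- def _last_sunday(y: int, m: int) -> int:
--     """Closed-form last Sunday of March (m=3) or October (m=10), both 31-day months:
--     Sakamoto weekday (Monday=0) of the 31st, then step back by its distance to Sunday."""
--     t = 2 if m == 3 else 6  # Sakamoto month constant for March / October
--     w = (y + y // 4 - y // 100 + y // 400 + t + 31 - 1) % 7  # Mon0 weekday of the 31st
--     return 31 - ((w + 1) % 7)
--
-- def _eu_dst_active_utc(y: int, mo: int, d: int, hh: int, mm: int, ss: int) -> bool:
--     """EU DST rule in UTC: active from last Sunday of March 01:00 UTC to last Sunday of October 01:00 UTC."""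
--     cur = _key(mo, d, hh, mm, ss)
--     return _key(3, _last_sunday(y, 3), 1, 0, 0) <= cur < _key(10, _last_sunday(y, 10), 1, 0, 0)
-- ===== Notes on version B (the rewrite author's own statement) =====
-- stated objective: alternative
-- what changed: Replaces the two decrementing while-loops that search for the last Sunday with a closed-form modular-arithmetic computation (n - ((weekday+1) % 7)), and replaces the lexicographic 6-tuple comparison with a single packed-integer key comparison.
import Mathlib
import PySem

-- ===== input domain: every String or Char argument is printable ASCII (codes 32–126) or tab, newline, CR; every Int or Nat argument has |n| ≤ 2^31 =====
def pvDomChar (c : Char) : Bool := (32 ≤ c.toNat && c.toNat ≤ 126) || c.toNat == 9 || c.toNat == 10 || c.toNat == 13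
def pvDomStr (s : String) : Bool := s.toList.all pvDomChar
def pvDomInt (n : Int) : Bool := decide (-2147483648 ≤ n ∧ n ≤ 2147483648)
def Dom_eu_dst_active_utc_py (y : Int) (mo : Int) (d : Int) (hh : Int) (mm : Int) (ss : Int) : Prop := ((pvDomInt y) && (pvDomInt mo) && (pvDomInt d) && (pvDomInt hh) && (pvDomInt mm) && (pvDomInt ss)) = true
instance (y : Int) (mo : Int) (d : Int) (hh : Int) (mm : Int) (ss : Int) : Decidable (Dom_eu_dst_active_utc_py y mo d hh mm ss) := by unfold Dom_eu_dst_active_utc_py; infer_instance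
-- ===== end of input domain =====

-- B replaces the two while-loop searches for the last Sunday with closed-form modular
-- arithmetic and the 6-tuple lexicographic comparison with one packed-integer key comparison.


-- ===== PORT A =====
-- helpers shared verbatim by both Python versions (same source text in Source A and Source B)
def pv_is_leap_year (year : Int) : Bool :=
  (PySem.Int.mod year 4 == 0 && PySem.Int.mod year 100 != 0) || PySem.Int.mod year 400 == 0

def pv_days_in_month (year : Int) (month : Int) : Int :=
  if ([1, 3, 5, 7, 8, 10, 12] : List Int).contains month then 31
  else if ([4, 6, 9, 11] : List Int).contains month then 30
  else if pv_is_leap_year year then 29 else 28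

def pv_weekday_mon0 (year : Int) (month : Int) (day : Int) : Int :=
  let t : List Int := [0, 3, 2, 5, 0, 3, 5, 1, 4, 6, 2, 4]
  let y := if month < 3 then year - 1 else year
  -- t[month - 1]: in range at every call site of this module (month = 3 or 10)
  let w_sun0 := PySem.Int.mod
    (y + PySem.Int.floordiv y 4 - PySem.Int.floordiv y 100 + PySem.Int.floordiv y 400
      + (PySem.List.pyGet? t (month - 1)).getD 0 + day) 7
  PySem.Int.mod (w_sun0 - 1) 7

-- the Python 'while _weekday_mon0(...) != 6: last -= 1'; fuel 40 > 7 iterations it can take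
def pvA_lastSundayLoop (y : Int) (m : Int) : Nat → Int → Int
  | 0, dd => dd
  | fuel + 1, dd =>
    if pv_weekday_mon0 y m dd ≠ 6 then pvA_lastSundayLoop y m fuel (dd - 1) else dd

-- Python tuple comparisons cur >= start, cur < end (lexicographic on 6 ints)
def pvA_tupGe (a b : Int × Int × Int × Int × Int × Int) : Bool :=
  decide (b.1 < a.1 ∨ (b.1 = a.1 ∧ (b.2.1 < a.2.1 ∨ (b.2.1 = a.2.1 ∧
    (b.2.2.1 < a.2.2.1 ∨ (b.2.2.1 = a.2.2.1 ∧ (b.2.2.2.1 < a.2.2.2.1 ∨ (b.2.2.2.1 = a.2.2.2.1 ∧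
    (b.2.2.2.2.1 < a.2.2.2.2.1 ∨ (b.2.2.2.2.1 = a.2.2.2.2.1 ∧ b.2.2.2.2.2 ≤ a.2.2.2.2.2))))))))))

def pvA_tupLt (a b : Int × Int × Int × Int × Int × Int) : Bool :=
  decide (a.1 < b.1 ∨ (a.1 = b.1 ∧ (a.2.1 < b.2.1 ∨ (a.2.1 = b.2.1 ∧
    (a.2.2.1 < b.2.2.1 ∨ (a.2.2.1 = b.2.2.1 ∧ (a.2.2.2.1 < b.2.2.2.1 ∨ (a.2.2.2.1 = b.2.2.2.1 ∧
    (a.2.2.2.2.1 < b.2.2.2.2.1 ∨ (a.2.2.2.2.1 = b.2.2.2.2.1 ∧ a.2.2.2.2.2 < b.2.2.2.2.2))))))))))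

def eu_dst_active_utc_py (y : Int) (mo : Int) (d : Int) (hh : Int) (mm : Int) (ss : Int) : Bool :=
  let mar_last := pvA_lastSundayLoop y 3 40 (pv_days_in_month y 3)
  let oct_last := pvA_lastSundayLoop y 10 40 (pv_days_in_month y 10)
  let cur := (y, mo, d, hh, mm, ss)
  let start := (y, (3 : Int), mar_last, (1 : Int), (0 : Int), (0 : Int))
  let stop := (y, (10 : Int), oct_last, (1 : Int), (0 : Int), (0 : Int))
  pvA_tupGe cur start && pvA_tupLt cur stop

-- ===== PORT B =====
-- _key: pack (mo,d,hh,mm,ss) into one int, base 2^33 = 8589934592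
def pvB_key (mo : Int) (d : Int) (hh : Int) (mm : Int) (ss : Int) : Int :=
  (((mo * 8589934592 + d) * 8589934592 + hh) * 8589934592 + mm) * 8589934592 + ss

-- closed form: Sakamoto weekday (Mon=0) of the 31st, then step back to the Sunday
def pvB_last_sunday (y : Int) (m : Int) : Int :=
  let t : Int := if m == 3 then 2 else 6
  let w := PySem.Int.mod
    (y + PySem.Int.floordiv y 4 - PySem.Int.floordiv y 100 + PySem.Int.floordiv y 400
      + t + 31 - 1) 7
  31 - PySem.Int.mod (w + 1) 7

def eu_dst_active_utc_py_alt (y : Int) (mo : Int) (d : Int) (hh : Int) (mm : Int) (ss : Int) : Bool :=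
  let cur := pvB_key mo d hh mm ss
  decide (pvB_key 3 (pvB_last_sunday y 3) 1 0 0 ≤ cur) &&
  decide (cur < pvB_key 10 (pvB_last_sunday y 10) 1 0 0)

-- ===== PRECONDITION & SPEC =====
def Spec_eu_dst_active_utc_py (y : Int) (mo : Int) (d : Int) (hh : Int) (mm : Int) (ss : Int) (out : Bool) : Prop := out = eu_dst_active_utc_py_alt y mo d hh mm ss
instance (y : Int) (mo : Int) (d : Int) (hh : Int) (mm : Int) (ss : Int) (out : Bool) : Decidable (Spec_eu_dst_active_utc_py y mo d hh mm ss out) := by unfold Spec_eu_dst_active_utc_py; infer_instance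

-- ===== CLAIM (what is proved, stated in full; the proofs are below) =====
def Claim_equal_eu_dst_active_utc_py : Prop := ∀ (y : Int) (mo : Int) (d : Int) (hh : Int) (mm : Int) (ss : Int), Dom_eu_dst_active_utc_py y mo d hh mm ss → Spec_eu_dst_active_utc_py y mo d hh mm ss (eu_dst_active_utc_py y mo d hh mm ss)

-- ===== LEMMAS AND PROOFS =====

-- Sakamoto sum for a month ≥ 3
def pvS (y : Int) : Int :=
  y + PySem.Int.floordiv y 4 - PySem.Int.floordiv y 100 + PySem.Int.floordiv y 400

theorem pv_weekday3 (y dd : Int) :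
    pv_weekday_mon0 y 3 dd = ((pvS y + 2 + dd) % 7 - 1) % 7 := by
  simp [pv_weekday_mon0, pvS, PySem.List.pyGet?, PySem.List.pyIdx?]

theorem pv_weekday10 (y dd : Int) :
    pv_weekday_mon0 y 10 dd = ((pvS y + 6 + dd) % 7 - 1) % 7 := by
  simp [pv_weekday_mon0, pvS, PySem.List.pyGet?, PySem.List.pyIdx?]

theorem pv_loopGen (y m C : Int)
    (hw : ∀ dd, pv_weekday_mon0 y m dd = ((C + dd) % 7 - 1) % 7) :
    ∀ (fuel : Nat) (n : Int), (C + n) % 7 < fuel →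
      pvA_lastSundayLoop y m fuel n = n - (C + n) % 7 := by
  intro fuel
  induction fuel with
  | zero => intro n h; exfalso; omega
  | succ k ih =>
    intro n h
    rw [pvA_lastSundayLoop, hw]
    by_cases h0 : (C + n) % 7 = 0
    · rw [if_neg (show ¬ (((C + n) % 7 - 1) % 7 ≠ 6) by omega)]
      omega
    · have hcond : ((C + n) % 7 - 1) % 7 ≠ 6 := by omega
      rw [if_pos hcond, ih (n - 1) (by omega)]
      omega

-- one packing level: comparing x*W + tail when |tail| < W/2
theorem pvStepLe2 (x1 x2 p q : Int)
    (hp : -18446744075857035264 ≤ p ∧ p ≤ 18446744075857035264)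
    (hq : -18446744075857035264 ≤ q ∧ q ≤ 18446744075857035264) :
    (x1 < x2 ∨ (x1 = x2 ∧ p ≤ q)) ↔
      x1 * 73786976294838206464 + p ≤ x2 * 73786976294838206464 + q := by omega

theorem pvStepLe3 (x1 x2 p q : Int)
    (hp : -158456325046975419262944935936 ≤ p ∧ p ≤ 158456325046975419262944935936)
    (hq : -158456325046975419262944935936 ≤ q ∧ q ≤ 158456325046975419262944935936) :
    (x1 < x2 ∨ (x1 = x2 ∧ p ≤ q)) ↔
      x1 * 633825300114114700748351602688 + p ≤ x2 * 633825300114114700748351602688 + q := by omega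

theorem pvStepLe4 (x1 x2 p q : Int)
    (hp : -1361129467842210178900473848990017781760 ≤ p ∧ p ≤ 1361129467842210178900473848990017781760)
    (hq : -1361129467842210178900473848990017781760 ≤ q ∧ q ≤ 1361129467842210178900473848990017781760) :
    (x1 < x2 ∨ (x1 = x2 ∧ p ≤ q)) ↔
      x1 * 5444517870735015415413993718908291383296 + p ≤ x2 * 5444517870735015415413993718908291383296 + q := by omega

theorem pvStepLt2 (x1 x2 p q : Int)
    (hp : -18446744075857035264 ≤ p ∧ p ≤ 18446744075857035264)
    (hq : -18446744075857035264 ≤ q ∧ q ≤ 18446744075857035264) :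
    (x1 < x2 ∨ (x1 = x2 ∧ p < q)) ↔
      x1 * 73786976294838206464 + p < x2 * 73786976294838206464 + q := by omega

theorem pvStepLt3 (x1 x2 p q : Int)
    (hp : -158456325046975419262944935936 ≤ p ∧ p ≤ 158456325046975419262944935936)
    (hq : -158456325046975419262944935936 ≤ q ∧ q ≤ 158456325046975419262944935936) :
    (x1 < x2 ∨ (x1 = x2 ∧ p < q)) ↔
      x1 * 633825300114114700748351602688 + p < x2 * 633825300114114700748351602688 + q := by omega

theorem pvStepLt4 (x1 x2 p q : Int)
    (hp : -1361129467842210178900473848990017781760 ≤ p ∧ p ≤ 1361129467842210178900473848990017781760)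
    (hq : -1361129467842210178900473848990017781760 ≤ q ∧ q ≤ 1361129467842210178900473848990017781760) :
    (x1 < x2 ∨ (x1 = x2 ∧ p < q)) ↔
      x1 * 5444517870735015415413993718908291383296 + p < x2 * 5444517870735015415413993718908291383296 + q := by omega

-- 5-field lexicographic order = packed-key order, for fields bounded by 2^31
theorem pvKeyLe (m1 d1 h1 n1 s1 m2 d2 h2 n2 s2 : Int)
    (b1 : -2147483648 ≤ d1 ∧ d1 ≤ 2147483648) (b2 : -2147483648 ≤ h1 ∧ h1 ≤ 2147483648)
    (b3 : -2147483648 ≤ n1 ∧ n1 ≤ 2147483648) (b4 : -2147483648 ≤ s1 ∧ s1 ≤ 2147483648)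
    (b5 : -2147483648 ≤ d2 ∧ d2 ≤ 2147483648) (b6 : -2147483648 ≤ h2 ∧ h2 ≤ 2147483648)
    (b7 : -2147483648 ≤ n2 ∧ n2 ≤ 2147483648) (b8 : -2147483648 ≤ s2 ∧ s2 ≤ 2147483648) :
    (m1 < m2 ∨ (m1 = m2 ∧ (d1 < d2 ∨ (d1 = d2 ∧ (h1 < h2 ∨ (h1 = h2 ∧
      (n1 < n2 ∨ (n1 = n2 ∧ s1 ≤ s2)))))))) ↔
    (((m1 * 8589934592 + d1) * 8589934592 + h1) * 8589934592 + n1) * 8589934592 + s1 ≤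
    (((m2 * 8589934592 + d2) * 8589934592 + h2) * 8589934592 + n2) * 8589934592 + s2 := by
  have t1 : (n1 < n2 ∨ (n1 = n2 ∧ s1 ≤ s2)) ↔
      n1 * 8589934592 + s1 ≤ n2 * 8589934592 + s2 := by omega
  rw [t1, pvStepLe2 h1 h2 _ _ (by omega) (by omega),
      pvStepLe3 d1 d2 _ _ (by omega) (by omega),
      pvStepLe4 m1 m2 _ _ (by omega) (by omega)]
  ring_nf

theorem pvKeyLt (m1 d1 h1 n1 s1 m2 d2 h2 n2 s2 : Int)
    (b1 : -2147483648 ≤ d1 ∧ d1 ≤ 2147483648) (b2 : -2147483648 ≤ h1 ∧ h1 ≤ 2147483648)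
    (b3 : -2147483648 ≤ n1 ∧ n1 ≤ 2147483648) (b4 : -2147483648 ≤ s1 ∧ s1 ≤ 2147483648)
    (b5 : -2147483648 ≤ d2 ∧ d2 ≤ 2147483648) (b6 : -2147483648 ≤ h2 ∧ h2 ≤ 2147483648)
    (b7 : -2147483648 ≤ n2 ∧ n2 ≤ 2147483648) (b8 : -2147483648 ≤ s2 ∧ s2 ≤ 2147483648) :
    (m1 < m2 ∨ (m1 = m2 ∧ (d1 < d2 ∨ (d1 = d2 ∧ (h1 < h2 ∨ (h1 = h2 ∧
      (n1 < n2 ∨ (n1 = n2 ∧ s1 < s2)))))))) ↔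
    (((m1 * 8589934592 + d1) * 8589934592 + h1) * 8589934592 + n1) * 8589934592 + s1 <
    (((m2 * 8589934592 + d2) * 8589934592 + h2) * 8589934592 + n2) * 8589934592 + s2 := by
  have t1 : (n1 < n2 ∨ (n1 = n2 ∧ s1 < s2)) ↔
      n1 * 8589934592 + s1 < n2 * 8589934592 + s2 := by omega
  rw [t1, pvStepLt2 h1 h2 _ _ (by omega) (by omega),
      pvStepLt3 d1 d2 _ _ (by omega) (by omega),
      pvStepLt4 m1 m2 _ _ (by omega) (by omega)]
  ring_nf

theorem eu_dst_active_utc_py_spec : Claim_equal_eu_dst_active_utc_py := by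
  intro y mo d hh mm ss hDom
  simp only [Dom_eu_dst_active_utc_py, pvDomInt, Bool.and_eq_true, decide_eq_true_eq] at hDom
  obtain ⟨⟨⟨⟨⟨hy, hmo⟩, hd⟩, hhh⟩, hmm⟩, hss⟩ := hDom
  unfold Spec_eu_dst_active_utc_py eu_dst_active_utc_py eu_dst_active_utc_py_alt
  have hd3 : pv_days_in_month y 3 = 31 := by simp [pv_days_in_month]
  have hd10 : pv_days_in_month y 10 = 31 := by simp [pv_days_in_month]
  set r3 : Int := (pvS y + 2 + 31) % 7 with hr3
  set r10 : Int := (pvS y + 6 + 31) % 7 with hr10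
  have hr3b : 0 ≤ r3 ∧ r3 < 7 := by rw [hr3]; omega
  have hr10b : 0 ≤ r10 ∧ r10 < 7 := by rw [hr10]; omega
  have hl3 : pvA_lastSundayLoop y 3 40 (pv_days_in_month y 3) = 31 - r3 := by
    rw [hd3, pv_loopGen y 3 (pvS y + 2) (fun dd => pv_weekday3 y dd) 40 31 (by omega)]
  have hl10 : pvA_lastSundayLoop y 10 40 (pv_days_in_month y 10) = 31 - r10 := by
    rw [hd10, pv_loopGen y 10 (pvS y + 6) (fun dd => pv_weekday10 y dd) 40 31 (by omega)]
  have hb3 : pvB_last_sunday y 3 = 31 - r3 := by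
    rw [hr3]
    simp [pvB_last_sunday, pvS]
  have hb10 : pvB_last_sunday y 10 = 31 - r10 := by
    rw [hr10]
    simp [pvB_last_sunday, pvS]
  simp only [hl3, hl10, hb3, hb10, pvA_tupGe, pvA_tupLt, pvB_key]
  congr 1
  · apply decide_eq_decide.mpr
    simp only [lt_self_iff_false, false_or, true_and]
    exact pvKeyLe 3 (31 - r3) 1 0 0 mo d hh mm ss (by omega) (by omega) (by omega) (by omega)
      (by omega) (by omega) (by omega) (by omega)
  · apply decide_eq_decide.mpr
    simp only [lt_self_iff_false, false_or, true_and]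
    exact pvKeyLt mo d hh mm ss 10 (31 - r10) 1 0 0 (by omega) (by omega) (by omega) (by omega)
      (by omega) (by omega) (by omega) (by omega)
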